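-- pv_equiv track=rewrite | github.com/khaudayne/som_project_III | src/neuron.py | cal_list_score
-- ===== SOURCE A (Python) =====
-- def cal_list_score(problem, network):
--     check = [False] * len(problem)
--     total_score = 0
--     list_score = []
--     for i in range(len(network)):
--         tmp_score = 0
--         for j in range(len(network[i])):
--             way_point = network[i][j]
--             for k in range(len(problem)):
--                 if check[k]:
--                     continue
--
--                 #kiểm tra way_point có nằm trong region view_point của điểm cần quan sát hay không
--                 sqr_dis = (way_point[0] - problem[k][0]) ** 2 + (way_point[1] - problem[k][1]) ** 2
--                 if sqr_dis <= problem[k][2] * problem[k][2]: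
--                     check[k] = True
--                     tmp_score += problem[k][3]
--         total_score += tmp_score
--         list_score.append(tmp_score)
--
--     return total_score, list_score, check
-- ===== SOURCE B (Python) =====
-- def cal_list_score(problem, network):
--     # Transposed decomposition: outer loop over problems; each problem is
--     # credited to the first network row containing a covering waypoint.
--     list_score = [0] * len(network)
--     check = []
--     for x, y, r, s in problem:
--         i = next((i for i, row in enumerate(network)
--                   if any((wx - x) ** 2 + (wy - y) ** 2 <= r * r for wx, wy in row)),
--                  None)
--         check.append(i is not None)
--         if i is not None:
--             list_score[i] += s
--     return sum(list_score), list_score, check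
-- ===== Notes on version B (the rewrite author's own statement) =====
-- stated objective: alternative
-- what changed: Loop nesting is transposed: instead of triple-nested scans over rows/waypoints/problems with a shared check array, B iterates once over problems and finds each problem's first covering network row (first waypoint in row-major order) with an early-exit scan, crediting its score to that row.
import Mathlib
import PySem

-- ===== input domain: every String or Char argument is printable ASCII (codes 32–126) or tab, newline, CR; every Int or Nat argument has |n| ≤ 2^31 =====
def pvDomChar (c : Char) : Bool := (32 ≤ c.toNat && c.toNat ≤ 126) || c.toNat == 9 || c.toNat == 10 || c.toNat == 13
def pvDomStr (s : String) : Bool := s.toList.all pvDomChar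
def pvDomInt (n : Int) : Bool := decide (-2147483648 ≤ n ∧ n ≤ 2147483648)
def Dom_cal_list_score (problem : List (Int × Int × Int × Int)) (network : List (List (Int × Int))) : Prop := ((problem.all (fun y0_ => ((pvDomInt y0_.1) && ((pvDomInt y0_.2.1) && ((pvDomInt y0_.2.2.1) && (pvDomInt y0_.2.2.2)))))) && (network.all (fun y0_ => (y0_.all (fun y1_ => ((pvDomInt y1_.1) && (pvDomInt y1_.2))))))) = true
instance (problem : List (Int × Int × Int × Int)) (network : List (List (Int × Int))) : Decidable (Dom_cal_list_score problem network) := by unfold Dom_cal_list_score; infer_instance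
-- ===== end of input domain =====

-- B transposes the loop nesting: one pass over problems, each credited to its first covering
-- network row found by an early-exit scan, instead of A's triple scan with a shared check array.


-- shared helper: the covering test both Pythons write as (wx-x)**2 + (wy-y)**2 <= r*r
def pvCovers (p : Int × Int × Int × Int) (w : Int × Int) : Bool :=
  (w.1 - p.1) ^ 2 + (w.2 - p.2.1) ^ 2 ≤ p.2.2.1 * p.2.2.1

-- ===== PORT A =====
-- A's innermost loop: k over the problems, reading/updating check[k] and accumulating tmp_score
def pvScanA (w : Int × Int) : List (Int × Int × Int × Int) → List Bool → List Bool × Int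
  | [], _ => ([], 0)
  | _, [] => ([], 0)
  | p :: ps, c :: cs =>
    let (cs', t) := pvScanA w ps cs
    if c then (true :: cs', t)
    else if pvCovers p w then (true :: cs', p.2.2.2 + t)
    else (false :: cs', t)

-- A's middle loop: j over the waypoints of one row, threading check and tmp_score
def pvRowA (ws : List (Int × Int)) (problem : List (Int × Int × Int × Int)) (check : List Bool) : List Bool × Int :=
  match ws with
  | [] => (check, 0)
  | w :: ws' =>
    let (c1, t1) := pvScanA w problem check
    let (c2, t2) := pvRowA ws' problem c1
    (c2, t1 + t2)

-- A's outer loop: i over the rows, accumulating total_score and list_score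
def pvRowsA (rows : List (List (Int × Int))) (problem : List (Int × Int × Int × Int)) (check : List Bool) : Int × List Int × List Bool :=
  match rows with
  | [] => (0, [], check)
  | r :: rs =>
    let (c1, tmp) := pvRowA r problem check
    let (tot, ls, cf) := pvRowsA rs problem c1
    (tmp + tot, tmp :: ls, cf)

def cal_list_score (problem : List (Int × Int × Int × Int)) (network : List (List (Int × Int))) : Int × List Int × List Bool :=
  pvRowsA network problem (problem.map (fun _ => false))

-- ===== PORT B =====
def cal_list_score_alt (problem : List (Int × Int × Int × Int)) (network : List (List (Int × Int))) : Int × List Int × List Bool :=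
  let st := problem.foldl (fun (st : List Int × List Bool) p =>
      match List.findIdx? (fun row => row.any (pvCovers p)) network with
      | some i => (st.1.modify i (· + p.2.2.2), st.2 ++ [true])
      | none => (st.1, st.2 ++ [false]))
    (network.map (fun _ => (0 : Int)), [])
  (st.1.sum, st.1, st.2)

-- ===== PRECONDITION & SPEC =====
def Spec_cal_list_score (problem : List (Int × Int × Int × Int)) (network : List (List (Int × Int))) (out : Int × List Int × List Bool) : Prop := out = cal_list_score_alt problem network
instance (problem : List (Int × Int × Int × Int)) (network : List (List (Int × Int))) (out : Int × List Int × List Bool) : Decidable (Spec_cal_list_score problem network out) := by unfold Spec_cal_list_score; infer_instance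

-- ===== CLAIM (what is proved, stated in full; the proofs are below) =====
def Claim_equal_cal_list_score : Prop := ∀ (problem : List (Int × Int × Int × Int)) (network : List (List (Int × Int))), Dom_cal_list_score problem network → Spec_cal_list_score problem network (cal_list_score problem network)

-- ===== LEMMAS AND PROOFS =====

-- per-problem contribution vector: score at the first covering row (scanned with flag c)
def pvVec (rows : List (List (Int × Int))) (p : Int × Int × Int × Int) (c : Bool) : List Int :=
  match rows with
  | [] => []
  | r :: rs =>
    if c then 0 :: pvVec rs p true
    else if r.any (pvCovers p) then p.2.2.2 :: pvVec rs p true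
    else 0 :: pvVec rs p false

-- sum of the per-problem contribution vectors
def pvL (rows : List (List (Int × Int))) : List (Int × Int × Int × Int) → List Bool → List Int
  | [], _ => rows.map (fun _ => 0)
  | _, [] => rows.map (fun _ => 0)
  | p :: ps, c :: cs => List.zipWith (· + ·) (pvVec rows p c) (pvL rows ps cs)

theorem pvVec_length (rows : List (List (Int × Int))) (p : Int × Int × Int × Int) (c : Bool) :
    (pvVec rows p c).length = rows.length := by
  induction rows generalizing c with
  | nil => rfl
  | cons r rs ih => simp only [pvVec]; split_ifs <;> simp [ih]

theorem pvL_length (rows : List (List (Int × Int))) (ps : List (Int × Int × Int × Int)) (cs : List Bool) :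
    (pvL rows ps cs).length = rows.length := by
  induction ps generalizing cs with
  | nil => simp [pvL]
  | cons p ps ih =>
    cases cs with
    | nil => simp [pvL]
    | cons c cs => simp [pvL, pvVec_length, ih]

theorem pvVec_true (rows : List (List (Int × Int))) (p : Int × Int × Int × Int) :
    pvVec rows p true = rows.map (fun _ => 0) := by
  induction rows with
  | nil => rfl
  | cons r rs ih => simp [pvVec, ih]

theorem zipWith_add_repl (xs : List Int) (n : Nat) (h : xs.length = n) :
    List.zipWith (· + ·) xs (List.replicate n (0 : Int)) = xs := by
  induction xs generalizing n with
  | nil => simp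
  | cons x xs ih =>
    cases n with
    | zero => simp at h
    | succ m => simp at h; simp [List.replicate_succ, ih m h]

theorem zipWith_repl_add (xs : List Int) (n : Nat) (h : xs.length = n) :
    List.zipWith (· + ·) (List.replicate n (0 : Int)) xs = xs := by
  induction xs generalizing n with
  | nil => simp
  | cons x xs ih =>
    cases n with
    | zero => simp at h
    | succ m => simp at h; simp [List.replicate_succ, ih m h]

theorem zipWith_congr' {β γ : Type} (f g : (Int × Int × Int × Int) → β → γ)
    (ps : List (Int × Int × Int × Int)) (cs : List β) (h : ∀ p c, f p c = g p c) :
    List.zipWith f ps cs = List.zipWith g ps cs := by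
  induction ps generalizing cs with
  | nil => rfl
  | cons p ps ih => cases cs with | nil => rfl | cons c cs => simp [h, ih]

theorem sum_zipWith_zero (f : (Int × Int × Int × Int) → Bool → Int)
    (ps : List (Int × Int × Int × Int)) (cs : List Bool) (h : ∀ p c, f p c = 0) :
    (List.zipWith f ps cs).sum = 0 := by
  induction ps generalizing cs with
  | nil => simp
  | cons p ps ih => cases cs with | nil => simp | cons c cs => simp [h, ih]

theorem zipWith_snd (ps : List (Int × Int × Int × Int)) (cs : List Bool) (h : cs.length = ps.length) :
    List.zipWith (fun (_ : Int × Int × Int × Int) (c : Bool) => c) ps cs = cs := by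
  induction ps generalizing cs with
  | nil => cases cs with | nil => rfl | cons c cs => simp at h
  | cons p ps ih =>
    cases cs with
    | nil => simp at h
    | cons c cs => simp at h; simp [ih cs h]

theorem zipWith_comp {β γ : Type} (f : (Int × Int × Int × Int) → β → γ) (g : (Int × Int × Int × Int) → Bool → β)
    (ps : List (Int × Int × Int × Int)) (cs : List Bool) :
    List.zipWith f ps (List.zipWith g ps cs) = List.zipWith (fun p c => f p (g p c)) ps cs := by
  induction ps generalizing cs with
  | nil => rfl
  | cons p ps ih => cases cs with | nil => rfl | cons c cs => simp [ih]

theorem sum_zipWith_add (f g : (Int × Int × Int × Int) → Bool → Int)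
    (ps : List (Int × Int × Int × Int)) (cs : List Bool) :
    (List.zipWith f ps cs).sum + (List.zipWith g ps cs).sum
      = (List.zipWith (fun p c => f p c + g p c) ps cs).sum := by
  induction ps generalizing cs with
  | nil => simp
  | cons p ps ih =>
    cases cs with
    | nil => simp
    | cons c cs => simp [← ih]; ring

theorem zipWith_add_assoc (a b c : List Int) :
    List.zipWith (· + ·) (List.zipWith (· + ·) a b) c = List.zipWith (· + ·) a (List.zipWith (· + ·) b c) := by
  induction a generalizing b c with
  | nil => rfl
  | cons x a ih =>
    cases b with
    | nil => rfl
    | cons y b =>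
      cases c with
      | nil => rfl
      | cons z c => simp [ih]; ring

-- A1: characterisation of A's innermost loop
theorem pvScanA_char (w : Int × Int) (ps : List (Int × Int × Int × Int)) (cs : List Bool) :
    pvScanA w ps cs
      = (List.zipWith (fun p c => c || pvCovers p w) ps cs,
         (List.zipWith (fun p c => if c then 0 else if pvCovers p w then p.2.2.2 else 0) ps cs).sum) := by
  induction ps generalizing cs with
  | nil => cases cs <;> rfl
  | cons p ps ih =>
    cases cs with
    | nil => rfl
    | cons c cs =>
      simp only [pvScanA, ih]
      by_cases hc : c
      · simp [hc]
      · by_cases hw : pvCovers p w <;> simp [hc, hw]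

-- A2: characterisation of A's per-row loop
theorem map_zero_repl {α : Type} (rows : List α) :
    rows.map (fun _ => (0 : Int)) = List.replicate rows.length 0 := by
  induction rows with
  | nil => rfl
  | cons r rs ih => simp [List.replicate_succ, ih]

theorem pvL_nil (ps : List (Int × Int × Int × Int)) (cs : List Bool) : pvL [] ps cs = [] := by
  cases ps with
  | nil => rfl
  | cons p ps => cases cs with | nil => rfl | cons c cs => simp [pvL, pvVec]

theorem pvRowA_char (ws : List (Int × Int)) (ps : List (Int × Int × Int × Int)) (cs : List Bool)
    (h : cs.length = ps.length) :
    pvRowA ws ps cs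
      = (List.zipWith (fun p c => c || ws.any (pvCovers p)) ps cs,
         (List.zipWith (fun p c => if c then 0 else if ws.any (pvCovers p) then p.2.2.2 else 0) ps cs).sum) := by
  induction ws generalizing cs with
  | nil =>
    simp only [pvRowA, List.any_nil]
    rw [Prod.mk.injEq]
    refine ⟨?_, ?_⟩
    · rw [zipWith_congr' _ (fun _ c => c) ps cs (by intro p c; simp), zipWith_snd ps cs h]
    · rw [sum_zipWith_zero _ ps cs (by intro p c; by_cases hc : c <;> simp [hc])]
  | cons w ws ih =>
    have hlen : (List.zipWith (fun p c => c || pvCovers p w) ps cs).length = ps.length := by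
      simp [List.length_zipWith, h]
    simp only [pvRowA, pvScanA_char, ih _ hlen]
    rw [Prod.mk.injEq]
    refine ⟨?_, ?_⟩
    · rw [zipWith_comp]
      exact zipWith_congr' _ _ ps cs (by intro p c; simp [List.any_cons, Bool.or_assoc])
    · rw [zipWith_comp, sum_zipWith_add]
      apply congrArg
      apply zipWith_congr' _ _ ps cs
      intro p c
      cases c with
      | true => simp
      | false =>
        rw [List.any_cons]
        by_cases hpw : pvCovers p w = true
        · simp only [hpw, Bool.true_or, Bool.false_or]; simp
        · rw [Bool.not_eq_true] at hpw
          simp only [hpw, Bool.false_or]; simp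

-- pvL splits along a cons of rows
theorem pvL_cons_row (r : List (Int × Int)) (rs : List (List (Int × Int)))
    (ps : List (Int × Int × Int × Int)) (cs : List Bool) (h : cs.length = ps.length) :
    pvL (r :: rs) ps cs
      = (List.zipWith (fun p c => if c then 0 else if r.any (pvCovers p) then p.2.2.2 else 0) ps cs).sum
        :: pvL rs ps (List.zipWith (fun p c => c || r.any (pvCovers p)) ps cs) := by
  induction ps generalizing cs with
  | nil => cases cs <;> simp [pvL]
  | cons p ps ih =>
    cases cs with
    | nil => simp at h
    | cons c cs =>
      simp at h
      simp only [pvL, List.zipWith_cons_cons, List.sum_cons]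
      rw [ih cs h]
      simp only [pvVec]
      by_cases hc : c
      · simp [hc, List.zipWith_cons_cons]
      · by_cases hr : r.any (pvCovers p) <;> simp [hc, hr, List.zipWith_cons_cons]

-- A-side characterisation: A's outer loop computes pvL and the or-accumulated check
theorem pvRowsA_char (rows : List (List (Int × Int))) (ps : List (Int × Int × Int × Int)) (cs : List Bool)
    (h : cs.length = ps.length) :
    pvRowsA rows ps cs
      = ((pvL rows ps cs).sum, pvL rows ps cs,
         List.zipWith (fun p c => c || rows.any (fun r => r.any (pvCovers p))) ps cs) := by
  induction rows generalizing cs with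
  | nil =>
    simp only [pvRowsA, pvL_nil, List.any_nil, Bool.or_false, List.sum_nil]
    rw [zipWith_snd ps cs h]
  | cons r rs ih =>
    have hlen : (List.zipWith (fun p c => c || r.any (pvCovers p)) ps cs).length = ps.length := by
      simp [List.length_zipWith, h]
    simp only [pvRowsA, pvRowA_char r ps cs h, ih _ hlen]
    rw [pvL_cons_row r rs ps cs h]
    simp only [List.sum_cons, Prod.mk.injEq]
    refine ⟨by trivial, by trivial, ?_⟩
    rw [zipWith_comp]
    apply zipWith_congr' _ _ ps cs
    intro p c
    simp [List.any_cons, Bool.or_assoc]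

-- B-side bump lemma: crediting the first covering row equals adding the contribution vector
theorem modify_eq_zipWith_vec (rows : List (List (Int × Int))) (p : Int × Int × Int × Int)
    (scores : List Int) (h : scores.length = rows.length) :
    (match List.findIdx? (fun row => row.any (pvCovers p)) rows with
     | some i => scores.modify i (· + p.2.2.2)
     | none => scores)
      = List.zipWith (· + ·) scores (pvVec rows p false) := by
  induction rows generalizing scores with
  | nil =>
    cases scores with
    | nil => rfl
    | cons a s => simp at h
  | cons r rs ih =>
    cases scores with
    | nil => simp at h
    | cons a s =>
      simp at h
      rw [List.findIdx?_cons]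
      by_cases hr : r.any (pvCovers p)
      · simp [hr, pvVec, List.modify_cons, pvVec_true,
          zipWith_add_repl s rs.length h]
      · rw [Bool.not_eq_true] at hr
        have := ih s h
        simp only [hr, Bool.false_eq_true, if_false, pvVec]
        cases hfi : List.findIdx? (fun row => row.any (pvCovers p)) rs with
        | none =>
          rw [hfi] at this
          simp [← this, List.zipWith_cons_cons]
        | some i =>
          rw [hfi] at this
          simp [List.zipWith_cons_cons, this]

-- B-side characterisation: the fold over problems accumulates pvL and the any-based check
theorem pvFoldB_char (rows : List (List (Int × Int))) (ps : List (Int × Int × Int × Int))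
    (scores : List Int) (acc : List Bool) (h : scores.length = rows.length) :
    ps.foldl (fun (st : List Int × List Bool) p =>
        match List.findIdx? (fun row => row.any (pvCovers p)) rows with
        | some i => (st.1.modify i (· + p.2.2.2), st.2 ++ [true])
        | none => (st.1, st.2 ++ [false])) (scores, acc)
      = (List.zipWith (· + ·) scores (pvL rows ps (ps.map (fun _ => false))),
         acc ++ ps.map (fun p => rows.any (fun r => r.any (pvCovers p)))) := by
  induction ps generalizing scores acc with
  | nil => simp [pvL, zipWith_add_repl scores rows.length h]
  | cons p ps ih =>
    simp only [List.foldl_cons, List.map_cons, pvL]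
    cases hfi : List.findIdx? (fun row => row.any (pvCovers p)) rows with
    | some i =>
      have ha : rows.any (fun r => r.any (pvCovers p)) = true := by
        rw [← List.findIdx?_isSome, hfi]; rfl
      have hlen : (scores.modify i (· + p.2.2.2)).length = rows.length := by
        simp [h]
      rw [ih _ _ hlen]
      have hm : scores.modify i (· + p.2.2.2)
          = List.zipWith (· + ·) scores (pvVec rows p false) := by
        have := modify_eq_zipWith_vec rows p scores h
        rw [hfi] at this; exact this
      rw [hm, zipWith_add_assoc, ha]
      simp
    | none =>
      have ha : rows.any (fun r => r.any (pvCovers p)) = false := by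
        rw [← List.findIdx?_isSome, hfi]; rfl
      rw [ih _ _ h]
      have hv : pvVec rows p false = List.replicate rows.length 0 := by
        have := modify_eq_zipWith_vec rows p (List.replicate rows.length 0) (by simp)
        rw [hfi, zipWith_repl_add (pvVec rows p false) rows.length (pvVec_length rows p false)] at this
        exact this.symm
      rw [hv, zipWith_repl_add (pvL rows ps (ps.map (fun _ => false))) rows.length
            (pvL_length rows ps _), ha]
      simp

theorem zipWith_or_false (g : (Int × Int × Int × Int) → Bool) (ps : List (Int × Int × Int × Int)) :
    List.zipWith (fun p c => c || g p) ps (ps.map (fun _ => false)) = ps.map g := by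
  induction ps with
  | nil => rfl
  | cons p ps ih => simp only [List.map_cons, List.zipWith_cons_cons, Bool.false_or, ih]

-- ===== VERDICT (by name: the statement is the Claim_ definition above) =====
theorem cal_list_score_spec : Claim_equal_cal_list_score := by
  intro problem network hd
  clear hd
  unfold Spec_cal_list_score cal_list_score cal_list_score_alt
  rw [pvRowsA_char network problem (problem.map (fun _ => false)) (by simp)]
  rw [pvFoldB_char network problem (network.map (fun _ => (0:Int))) [] (by simp)]
  rw [map_zero_repl network,
      zipWith_repl_add (pvL network problem (problem.map (fun _ => false))) network.length
        (pvL_length network problem _)]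
  simp only [List.nil_append, Prod.mk.injEq]
  refine ⟨by trivial, by trivial, ?_⟩
  exact zipWith_or_false _ problem
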